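-- pv_equiv track=rewrite | github.com/cabbageGG/play_with_algorithm | binary_search.py | get_floor_ceil
-- ===== SOURCE A (Python) =====
-- def get_floor_ceil(list,mid,target):
--     i = j = mid
--     l = len(list)
--     while i>=0 and i<l:
--         if list[i] == target:
--             i = i - 1
--         else:
--             break
--     while j>=0 and j<l:
--         if list[j] == target:
--             j = j + 1
--         else:
--             break
--     return i+1, j-1
-- ===== SOURCE B (Python) =====
-- def get_floor_ceil(list, mid, target):
--     n = len(list)
--     if mid < 0 or mid >= n or list[mid] != target:
--         return (mid + 1, mid - 1)
--     # single left-to-right pass: run_start tracks the start of the current run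
--     # of target-valued elements; the first non-target at or after mid ends it.
--     run_start = 0
--     for k in range(n):
--         if list[k] != target:
--             if k < mid:
--                 run_start = k + 1
--             else:
--                 return (run_start, k - 1)
--     return (run_start, n - 1)
-- ===== Notes on version B (the rewrite author's own statement) =====
-- stated objective: alternative
-- what changed: instead of A's two bounds-checked index scans walking outward (left and right) from mid, B makes an early out-of-range/mismatch return and then ONE left-to-right pass over the whole list with a run-start accumulator, returning the boundaries of the equal run containing mid; the hinted boundary binary search was not used because A never assumes the list is sorted
import Mathlib
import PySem

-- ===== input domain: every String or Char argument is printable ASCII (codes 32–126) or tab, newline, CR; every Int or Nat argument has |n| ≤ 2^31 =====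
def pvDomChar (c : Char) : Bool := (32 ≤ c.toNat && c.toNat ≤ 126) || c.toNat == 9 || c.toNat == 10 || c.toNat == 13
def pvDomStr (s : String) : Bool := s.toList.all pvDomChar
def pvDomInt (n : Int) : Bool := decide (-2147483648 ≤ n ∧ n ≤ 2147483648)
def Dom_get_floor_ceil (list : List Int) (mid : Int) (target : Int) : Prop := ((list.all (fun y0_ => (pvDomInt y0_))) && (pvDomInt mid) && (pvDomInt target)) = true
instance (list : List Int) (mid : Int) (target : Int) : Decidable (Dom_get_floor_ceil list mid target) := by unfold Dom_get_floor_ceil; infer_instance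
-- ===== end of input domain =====

-- B replaces A's two outward index scans from mid by an early range/mismatch return plus
-- ONE left-to-right pass over the whole list tracking the start of the current equal run
-- (alternative traversal; B is O(n) where A is O(run length)).

-- ===== PORT A =====
-- A's first while loop: decrement i while in range and list[i] == target
def pvLeftLoop (list : List Int) (target : Int) (i : Int) : Int :=
  if h : 0 ≤ i ∧ i < (list.length : Int) then
    if PySem.List.pyGet? list i = some target then pvLeftLoop list target (i - 1) else i
  else i
termination_by (i + 1).toNat
decreasing_by omega

-- A's second while loop: increment j while in range and list[j] == target
def pvRightLoop (list : List Int) (target : Int) (j : Int) : Int :=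
  if h : 0 ≤ j ∧ j < (list.length : Int) then
    if PySem.List.pyGet? list j = some target then pvRightLoop list target (j + 1) else j
  else j
termination_by ((list.length : Int) - j).toNat
decreasing_by omega

def get_floor_ceil (list : List Int) (mid : Int) (target : Int) : List Int :=
  let i := pvLeftLoop list target mid
  let j := pvRightLoop list target mid
  [i + 1, j - 1]

-- ===== PORT B =====
-- Source B's for-loop over range(n): k is the running index, rs the current run start
def pvScan (list : List Int) (target : Int) (mid : Int) (k : Nat) (rs : Int) : List Int :=
  if h : k < list.length then
    if list[k] = target then pvScan list target mid (k + 1) rs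
    else if (k : Int) < mid then pvScan list target mid (k + 1) ((k : Int) + 1)
    else [rs, (k : Int) - 1]
  else [rs, (list.length : Int) - 1]
termination_by list.length - k

def get_floor_ceil_alt (list : List Int) (mid : Int) (target : Int) : List Int :=
  if mid < 0 ∨ (list.length : Int) ≤ mid ∨ PySem.List.pyGet? list mid ≠ some target then
    [mid + 1, mid - 1]
  else
    pvScan list target mid 0 0

-- ===== PRECONDITION & SPEC =====
def Spec_get_floor_ceil (list : List Int) (mid : Int) (target : Int) (out : List Int) : Prop := out = get_floor_ceil_alt list mid target
instance (list : List Int) (mid : Int) (target : Int) (out : List Int) : Decidable (Spec_get_floor_ceil list mid target out) := by unfold Spec_get_floor_ceil; infer_instance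

-- ===== CLAIM (what is proved, stated in full; the proofs are below) =====
def Claim_equal_get_floor_ceil : Prop := ∀ (list : List Int) (mid : Int) (target : Int), Dom_get_floor_ceil list mid target → Spec_get_floor_ceil list mid target (get_floor_ceil list mid target)

-- ===== LEMMAS AND PROOFS =====

-- run length of target at the head of a list
def pvRunLen : List Int → Int → Nat
  | [], _ => 0
  | x :: xs, t => if x = t then pvRunLen xs t + 1 else 0

-- left loop characterisation: starting at an in-range index holding target,
-- it ends at n minus (1 + run length of target going left from n-1)
theorem pvLeftLoop_eq (list : List Int) (t : Int) :
    ∀ (n : Nat) (hn : n < list.length), list[n] = t →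
      pvLeftLoop list t (n : Int) = (n : Int) - pvRunLen ((list.take n).reverse) t - 1 := by
  intro n
  induction n with
  | zero =>
    intro hn ht
    rw [pvLeftLoop, dif_pos (show (0:Int) ≤ ((0:Nat):Int) ∧ ((0:Nat):Int) < (list.length : Int)
          from ⟨by omega, by exact_mod_cast hn⟩),
        PySem.List.pyGet?_ofNat list 0 hn, ht, if_pos rfl]
    rw [pvLeftLoop, dif_neg (by omega)]
    simp [pvRunLen]
  | succ m ih =>
    intro hn ht
    rw [pvLeftLoop, dif_pos (show (0:Int) ≤ ((m+1:Nat):Int) ∧ ((m+1:Nat):Int) < (list.length : Int)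
          from ⟨by omega, by exact_mod_cast hn⟩),
        PySem.List.pyGet?_ofNat list (m+1) hn, ht, if_pos rfl]
    have hm : m < list.length := by omega
    have htake : list.take (m + 1) = list.take m ++ [list[m]] := by
      rw [List.take_add_one, List.getElem?_eq_getElem hm]; rfl
    have hcast : ((m + 1 : Nat) : Int) - 1 = (m : Int) := by push_cast; ring
    rw [hcast, htake, List.reverse_append]
    by_cases hmt : list[m] = t
    · rw [ih hm hmt]
      simp [pvRunLen, hmt]
    · rw [pvLeftLoop, dif_pos (show (0:Int) ≤ ((m:Nat):Int) ∧ ((m:Nat):Int) < (list.length : Int)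
            from ⟨by omega, by exact_mod_cast hm⟩),
          PySem.List.pyGet?_ofNat list m hm]
      simp [hmt, pvRunLen]

-- right loop characterisation: from any index n ≤ length it ends at
-- n plus the run length of target in the suffix starting at n
theorem pvRightLoop_eq (list : List Int) (t : Int) :
    ∀ (d n : Nat), list.length - n = d → n ≤ list.length →
      pvRightLoop list t (n : Int) = (n : Int) + pvRunLen (list.drop n) t := by
  intro d
  induction d with
  | zero =>
    intro n hd hn
    have hlen : n = list.length := by omega
    subst hlen
    rw [pvRightLoop, dif_neg (by omega)]
    simp [pvRunLen]
  | succ k ih =>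
    intro n hd hn
    have hlt : n < list.length := by omega
    have hdrop : list.drop n = list[n] :: list.drop (n + 1) :=
      List.drop_eq_getElem_cons hlt
    rw [pvRightLoop, dif_pos (show (0:Int) ≤ ((n:Nat):Int) ∧ ((n:Nat):Int) < (list.length : Int)
          from ⟨by omega, by exact_mod_cast hlt⟩),
        PySem.List.pyGet?_ofNat list n hlt]
    by_cases hnt : list[n] = t
    · have hih := ih (n + 1) (by omega) (by omega)
      push_cast at hih
      rw [if_pos (by rw [hnt]), hih, hdrop]
      simp only [pvRunLen, if_pos hnt]
      push_cast
      ring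
    · rw [if_neg (by simp [hnt]), hdrop]
      simp [pvRunLen, hnt]

-- phase 2 of B's scan: once k is past mid, rs is frozen and the scan stops at the
-- end of the current run
theorem pvScan_phase2 (list : List Int) (t : Int) (mid : Int) :
    ∀ (d k : Nat) (rs : Int), list.length - k = d → k ≤ list.length → mid < (k : Int) →
      pvScan list t mid k rs = [rs, (k : Int) + pvRunLen (list.drop k) t - 1] := by
  intro d
  induction d with
  | zero =>
    intro k rs hd hk hm
    have hlen : k = list.length := by omega
    subst hlen
    rw [pvScan, dif_neg (by omega)]
    simp [pvRunLen]
  | succ m ih =>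
    intro k rs hd hk hm
    have hlt : k < list.length := by omega
    have hdrop : list.drop k = list[k] :: list.drop (k + 1) :=
      List.drop_eq_getElem_cons hlt
    rw [pvScan, dif_pos hlt]
    by_cases hkt : list[k] = t
    · rw [if_pos hkt, ih (k + 1) rs (by omega) (by omega) (by push_cast; omega), hdrop]
      simp only [pvRunLen, if_pos hkt]
      push_cast
      ring_nf
    · rw [if_neg hkt, if_neg (by omega), hdrop]
      simp [pvRunLen, hkt]

-- phase 1 of B's scan: up to mid (which holds target), with rs = start of the run
-- ending just before k, the scan returns the boundaries of mid's run
theorem pvScan_phase1 (list : List Int) (t : Int) (midn : Nat)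
    (hmid : midn < list.length) (ht : list[midn] = t) :
    ∀ (d k : Nat), midn = k + d →
      pvScan list t (midn : Int) k ((k : Int) - pvRunLen ((list.take k).reverse) t) =
        [(midn : Int) - pvRunLen ((list.take midn).reverse) t,
         (midn : Int) + pvRunLen (list.drop (midn + 1)) t] := by
  intro d
  induction d with
  | zero =>
    intro k hk
    have hk' : k = midn := by omega
    subst hk'
    rw [pvScan, dif_pos hmid, if_pos ht,
        pvScan_phase2 list t (k : Int) (list.length - (k + 1)) (k + 1) _ (by omega) (by omega)
          (by push_cast; omega)]
    push_cast
    ring_nf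
  | succ m ih =>
    intro k hk
    have hlt : k < list.length := by omega
    have htake : list.take (k + 1) = list.take k ++ [list[k]] := by
      rw [List.take_add_one, List.getElem?_eq_getElem hlt]; rfl
    rw [pvScan, dif_pos hlt]
    by_cases hkt : list[k] = t
    · rw [if_pos hkt]
      have hrs : ((k + 1 : Nat) : Int) - pvRunLen ((list.take (k+1)).reverse) t =
          (k : Int) - pvRunLen ((list.take k).reverse) t := by
        rw [htake, List.reverse_append]
        simp only [List.reverse_singleton, List.singleton_append, pvRunLen, if_pos hkt]
        push_cast
        ring
      rw [← hrs]
      exact_mod_cast ih (k + 1) (by omega)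
    · rw [if_neg hkt, if_pos (by omega)]
      have hrs : ((k + 1 : Nat) : Int) - pvRunLen ((list.take (k+1)).reverse) t =
          (k : Int) + 1 := by
        rw [htake, List.reverse_append]
        simp [pvRunLen, hkt]
      rw [← hrs]
      exact_mod_cast ih (k + 1) (by omega)

-- ===== VERDICT (by name: the statement is the Claim_ definition above) =====
theorem get_floor_ceil_spec : Claim_equal_get_floor_ceil := by
  intro list mid target _
  unfold Spec_get_floor_ceil get_floor_ceil get_floor_ceil_alt
  by_cases h1 : mid < 0
  · rw [pvLeftLoop, dif_neg (by omega), pvRightLoop, dif_neg (by omega), if_pos (Or.inl h1)]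
  · by_cases h2 : (list.length : Int) ≤ mid
    · rw [pvLeftLoop, dif_neg (by omega), pvRightLoop, dif_neg (by omega),
          if_pos (Or.inr (Or.inl h2))]
    · -- 0 ≤ mid < length
      have hlt : mid.toNat < list.length := by omega
      by_cases h3 : list[mid.toNat] = target
      · have hget : PySem.List.pyGet? list mid = some target := by
          have h := PySem.List.pyGet?_ofNat list mid.toNat hlt
          rw [show ((mid.toNat : Nat) : Int) = mid by omega, h3] at h
          exact h
        rw [if_neg (by rintro (h | h | h) <;> first | omega | exact h hget)]
        rw [show mid = ((mid.toNat : Nat) : Int) by omega]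
        rw [pvLeftLoop_eq list target mid.toNat hlt h3,
            pvRightLoop_eq list target (list.length - mid.toNat) mid.toNat rfl (by omega)]
        have hB := pvScan_phase1 list target mid.toNat hlt h3 mid.toNat 0 (by omega)
        simp only [List.take_zero, List.reverse_nil, pvRunLen, Nat.cast_zero, sub_zero] at hB
        rw [hB, List.drop_eq_getElem_cons hlt]
        simp only [pvRunLen, if_pos h3, List.cons.injEq, and_true]
        constructor <;> (push_cast; ring)
      · have hget : PySem.List.pyGet? list mid = some list[mid.toNat] := by
          have h := PySem.List.pyGet?_ofNat list mid.toNat hlt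
          rwa [show ((mid.toNat : Nat) : Int) = mid by omega] at h
        rw [pvLeftLoop, dif_pos ⟨by omega, by omega⟩, hget, if_neg (by simp [h3]),
            pvRightLoop, dif_pos ⟨by omega, by omega⟩, hget, if_neg (by simp [h3])]
        rw [if_pos (Or.inr (Or.inr (by simp [h3] : some list[mid.toNat] ≠ some target)))]
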